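-- pv_equiv track=rewrite | github.com/KobaKhit/scsp-hackathon-global-security | mcp_server.py | _analyze_by_severity
-- ===== SOURCE A (Python) =====
-- from typing import Dict, Any, List
--
-- def _analyze_by_severity(events: List[Dict]) -> str:
--     """Analyze events by severity level"""
--     severity_data = {}
--     for event in events:
--         severity = event.get('severity', 'unknown')
--         if severity not in severity_data:
--             severity_data[severity] = []
--         severity_data[severity].append(event)
--
--     analysis = "**Severity Level Analysis**\n\n"
--     severity_order = ['critical', 'high', 'medium', 'low']
--
--     for severity in severity_order:
--         if severity in severity_data:
--             events_list = severity_data[severity]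
--             analysis += f"**{severity.upper()}** ({len(events_list)} events)\n"
--
--             categories = {}
--             for event in events_list:
--                 cat = event.get('category', 'unknown')
--                 categories[cat] = categories.get(cat, 0) + 1
--
--             analysis += f"- Categories: {', '.join([f'{cat}: {count}' for cat, count in categories.items()])}\n"
--             analysis += f"- Recent: {events_list[-1].get('title', 'Unknown')} ({events_list[-1].get('location', 'Unknown location')})\n\n"
--
--     return analysis
-- ===== SOURCE B (Python) =====
-- def _emit_runs(xs):
--     """Render a rank-sorted event list as consecutive runs of equal severity."""
--     if not xs:
--         return ""
--     sev = xs[0].get('severity', 'unknown')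
--     i = 1
--     while i < len(xs) and xs[i].get('severity', 'unknown') == sev:
--         i += 1
--     group, rest = xs[:i], xs[i:]
--     categories = {}
--     for e in group:
--         c = e.get('category', 'unknown')
--         categories[c] = categories.get(c, 0) + 1
--     sec = f"**{sev.upper()}** ({len(group)} events)\n"
--     sec += "- Categories: " + ", ".join(f"{c}: {k}" for c, k in categories.items()) + "\n"
--     sec += f"- Recent: {group[-1].get('title', 'Unknown')} ({group[-1].get('location', 'Unknown location')})\n\n"
--     return sec + _emit_runs(rest)
--
-- def _analyze_by_severity(events):
--     """Analyze events by severity level (stable sort by rank, then one run-splitting scan)."""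
--     rank = {s: i for i, s in enumerate(['critical', 'high', 'medium', 'low'])}
--     tagged = [e for e in events if e.get('severity', 'unknown') in rank]
--     tagged.sort(key=lambda e: rank[e.get('severity', 'unknown')])
--     return "**Severity Level Analysis**\n\n" + _emit_runs(tagged)
-- ===== Notes on version B (the rewrite author's own statement) =====
-- stated objective: alternative
-- what changed: B replaces A's severity-grouping dict and fixed-order lookup loop by a sort-then-scan: it stable-sorts the relevant events by severity rank and then splits the sorted list into consecutive equal-severity runs, emitting one section per run (stability keeps in-group order, so category first-seen order and the last element agree with A).
import Mathlib
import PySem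

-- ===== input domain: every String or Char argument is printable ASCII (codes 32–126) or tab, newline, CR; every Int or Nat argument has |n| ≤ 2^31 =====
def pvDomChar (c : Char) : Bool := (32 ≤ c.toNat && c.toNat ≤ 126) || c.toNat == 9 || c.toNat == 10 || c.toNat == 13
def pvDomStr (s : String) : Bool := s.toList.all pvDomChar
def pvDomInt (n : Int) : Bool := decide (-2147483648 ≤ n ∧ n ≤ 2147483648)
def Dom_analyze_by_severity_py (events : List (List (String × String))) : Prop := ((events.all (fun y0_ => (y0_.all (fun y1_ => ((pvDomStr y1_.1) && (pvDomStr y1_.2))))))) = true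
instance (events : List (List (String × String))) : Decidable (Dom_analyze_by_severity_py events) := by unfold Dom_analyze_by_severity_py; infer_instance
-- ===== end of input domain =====

-- B replaces A's severity-grouping dict by a stable sort of the relevant events by severity
-- rank followed by one run-splitting scan of the sorted list (objective: alternative).

-- event.get(key, default) on a Python dict represented as an association list
def pyGetStr (e : List (String × String)) (k d : String) : String :=
  (PySem.Dict.mk e).getD k d

-- event.get('severity', 'unknown') / event.get('category', 'unknown'), shared by both ports
def sevOf (e : List (String × String)) : String := pyGetStr e "severity" "unknown"
def catOf (e : List (String × String)) : String := pyGetStr e "category" "unknown"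

-- ===== PORT A =====
-- one iteration of A's grouping loop: `severity = event.get(...); if severity not in
-- severity_data: severity_data[severity] = []; severity_data[severity].append(event)`
def sevStepA (d : PySem.Dict String (List (List (String × String))))
    (event : List (String × String)) : PySem.Dict String (List (List (String × String))) :=
  let severity := sevOf event
  let d := if d.contains severity then d else d.insert severity []
  d.modify severity [] (· ++ [event])

-- body of A's `for severity in severity_order` loop
def sevBodyA (severity_data : PySem.Dict String (List (List (String × String))))
    (analysis severity : String) : String :=
  if severity_data.contains severity then
    let events_list := severity_data.getD severity []
    let analysis := analysis ++ ("**" ++ PySem.Str.upper severity ++ "** (" ++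
      PySem.Int.toStr events_list.length ++ " events)\n")
    let categories : PySem.Dict String Int := events_list.foldl
      (fun c event =>
        let cat := catOf event
        c.insert cat (c.getD cat 0 + 1)) PySem.Dict.empty
    let analysis := analysis ++ ("- Categories: " ++
      PySem.Str.join ", " (categories.items.map (fun p => p.1 ++ ": " ++ PySem.Int.toStr p.2)) ++ "\n")
    -- events_list[-1]: the key is present only for a non-empty group, so the IndexError
    -- branch (none) is unreachable; .getD [] is exact on every reachable state
    let last := (PySem.List.pyGet? events_list (-1)).getD []
    analysis ++ ("- Recent: " ++ pyGetStr last "title" "Unknown" ++ " (" ++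
      pyGetStr last "location" "Unknown location" ++ ")\n\n")
  else analysis

def analyze_by_severity_py (events : List (List (String × String))) : String :=
  let severity_data := events.foldl sevStepA PySem.Dict.empty
  ["critical", "high", "medium", "low"].foldl (sevBodyA severity_data)
    "**Severity Level Analysis**\n\n"

-- ===== PORT B =====
-- rank = {'critical': 0, 'high': 1, 'medium': 2, 'low': 3}
def rankDict : PySem.Dict String Int :=
  PySem.Dict.mk [("critical", 0), ("high", 1), ("medium", 2), ("low", 3)]

-- rank[e.get('severity','unknown')]: applied only to tagged events, where the key is
-- present, so the KeyError branch is unreachable and .getD 0 is exact there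
def rankOf (e : List (String × String)) : Int := rankDict.getD (sevOf e) 0

-- _emit_runs: split the sorted list into consecutive equal-severity runs, one section each
def emitRuns (xs : List (List (String × String))) : String :=
  match xs with
  | [] => ""
  | x :: tl =>
    let sev := sevOf x
    let group := x :: tl.takeWhile (fun e => sevOf e == sev)
    let rest := tl.dropWhile (fun e => sevOf e == sev)
    let categories : PySem.Dict String Int := group.foldl
      (fun c e =>
        let cat := catOf e
        c.insert cat (c.getD cat 0 + 1)) PySem.Dict.empty
    let sec := "**" ++ PySem.Str.upper sev ++ "** (" ++
      PySem.Int.toStr group.length ++ " events)\n"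
    let sec := sec ++ ("- Categories: " ++
      PySem.Str.join ", " (categories.items.map (fun p => p.1 ++ ": " ++ PySem.Int.toStr p.2)) ++ "\n")
    -- group[-1]: group is non-empty by construction, so .getD [] is exact
    let last := (PySem.List.pyGet? group (-1)).getD []
    let sec := sec ++ ("- Recent: " ++ pyGetStr last "title" "Unknown" ++ " (" ++
      pyGetStr last "location" "Unknown location" ++ ")\n\n")
    sec ++ emitRuns rest
  termination_by xs.length
  decreasing_by
    simp only [List.length_cons]
    exact Nat.lt_succ_of_le (List.length_dropWhile_le _ _)

def analyze_by_severity_py_alt (events : List (List (String × String))) : String :=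
  let tagged := events.filter (fun e => rankDict.contains (sevOf e))
  let sorted := PySem.List.sorted tagged rankOf
  "**Severity Level Analysis**\n\n" ++ emitRuns sorted

-- ===== PRECONDITION & SPEC =====
def Spec_analyze_by_severity_py (events : List (List (String × String))) (out : String) : Prop := out = analyze_by_severity_py_alt events
instance (events : List (List (String × String))) (out : String) : Decidable (Spec_analyze_by_severity_py events out) := by unfold Spec_analyze_by_severity_py; infer_instance

-- ===== CLAIM (what is proved, stated in full; the proofs are below) =====
def Claim_equal_analyze_by_severity_py : Prop := ∀ (events : List (List (String × String))), Dom_analyze_by_severity_py events → Spec_analyze_by_severity_py events (analyze_by_severity_py events)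

-- ===== LEMMAS AND PROOFS =====

-- the events of severity s, in original order
def fs (s : String) (events : List (List (String × String))) : List (List (String × String)) :=
  events.filter (fun e => sevOf e == s)

-- the section string rendered for a group (same rendering in both ports)
def secOf (s : String) (group : List (List (String × String))) : String :=
  let categories : PySem.Dict String Int := group.foldl
    (fun c e =>
      let cat := catOf e
      c.insert cat (c.getD cat 0 + 1)) PySem.Dict.empty
  let last := (PySem.List.pyGet? group (-1)).getD []
  "**" ++ PySem.Str.upper s ++ "** (" ++ PySem.Int.toStr group.length ++ " events)\n" ++
  ("- Categories: " ++
    PySem.Str.join ", " (categories.items.map (fun p => p.1 ++ ": " ++ PySem.Int.toStr p.2)) ++ "\n") ++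
  ("- Recent: " ++ pyGetStr last "title" "Unknown" ++ " (" ++
    pyGetStr last "location" "Unknown location" ++ ")\n\n")

theorem sevStepA_getD (d : PySem.Dict String (List (List (String × String))))
    (e : List (String × String)) (s : String) :
    (sevStepA d e).getD s [] =
      if sevOf e == s then d.getD s [] ++ [e] else d.getD s [] := by
  simp only [sevStepA]
  by_cases h : sevOf e == s
  · rw [if_pos h]
    have hs : s = sevOf e := (eq_of_beq h).symm
    subst hs
    by_cases hc : d.contains (sevOf e) = true
    · simp [hc, PySem.Dict.getD_modify_self]
    · simp [hc, PySem.Dict.getD_modify_self, PySem.Dict.getD_insert_self,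
        PySem.Dict.getD_of_not_contains d _ (by simpa using hc)]
  · have hne : s ≠ sevOf e := by
      intro hh; exact h (by simp [hh])
    rw [if_neg h]
    by_cases hc : d.contains (sevOf e) = true
    · simp [hc, PySem.Dict.getD_modify_of_ne _ _ _ hne]
    · simp [hc, PySem.Dict.getD_modify_of_ne _ _ _ hne,
        PySem.Dict.getD_insert_of_ne _ _ _ hne]

theorem sevStepA_contains (d : PySem.Dict String (List (List (String × String))))
    (e : List (String × String)) (s : String) :
    (sevStepA d e).contains s = (s == sevOf e || d.contains s) := by
  simp only [sevStepA]
  by_cases hc : d.contains (sevOf e) = true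
  · simp [hc, PySem.Dict.contains_modify]
  · simp only [hc, Bool.false_eq_true, reduceIte,
      PySem.Dict.contains_modify, PySem.Dict.contains_insert]
    cases h : (s == sevOf e) <;> simp

theorem foldl_sevStepA_getD (events : List (List (String × String)))
    (d : PySem.Dict String (List (List (String × String)))) (s : String) :
    (events.foldl sevStepA d).getD s [] = d.getD s [] ++ fs s events := by
  induction events generalizing d with
  | nil => simp [fs]
  | cons e tl ih =>
    simp only [fs, List.foldl_cons, List.filter_cons, ih, sevStepA_getD]
    by_cases h : sevOf e == s <;> simp [fs, h]

theorem foldl_sevStepA_contains (events : List (List (String × String)))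
    (d : PySem.Dict String (List (List (String × String)))) (s : String) :
    (events.foldl sevStepA d).contains s =
      (d.contains s || events.any (fun e => sevOf e == s)) := by
  induction events generalizing d with
  | nil => simp
  | cons e tl ih =>
    simp only [List.foldl_cons, List.any_cons, ih, sevStepA_contains]
    cases h1 : (s == sevOf e) <;> cases h2 : d.contains s <;>
      simp_all [BEq.comm]

-- rankDict membership, spelled out
theorem contains_rankDict (s : String) :
    rankDict.contains s =
      (s == "critical" || s == "high" || s == "medium" || s == "low") := by
  simp only [rankDict, PySem.Dict.mk, PySem.Dict.contains, PySem.Dict.insert,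
    PySem.Dict.empty]
  cases h1 : s == "critical" <;> cases h2 : s == "high" <;>
    cases h3 : s == "medium" <;> cases h4 : s == "low" <;>
    simp_all [List.foldl, BEq.comm]

-- insertBy skips a prefix it is not before
theorem insertBy_append {α : Type} (before : α → α → Bool) (x : α) (ys zs : List α)
    (h : ∀ y ∈ ys, before x y = false) :
    PySem.List.insertBy before x (ys ++ zs) = ys ++ PySem.List.insertBy before x zs := by
  induction ys with
  | nil => rfl
  | cons y ys ih =>
    have hy : before x y = false := h y (by simp)
    simp only [List.cons_append, PySem.List.insertBy, hy, Bool.false_eq_true,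
      reduceIte, List.cons.injEq, true_and]
    exact ih (fun y hy => h y (by simp [hy]))

-- insertBy puts x in front of a suffix it is before
theorem insertBy_front {α : Type} (before : α → α → Bool) (x : α) (zs : List α)
    (h : ∀ z ∈ zs, before x z = true) :
    PySem.List.insertBy before x zs = x :: zs := by
  cases zs with
  | nil => rfl
  | cons z zs =>
    have hz : before x z = true := h z (by simp)
    simp [PySem.List.insertBy, hz]

-- elements of fs s have severity s
theorem sev_of_mem_fs (s : String) (events : List (List (String × String)))
    (e : List (String × String)) (he : e ∈ fs s events) : sevOf e = s := by
  have := List.of_mem_filter he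
  exact eq_of_beq this


theorem rank_fs (s : String) (ES : List (List (String × String))) :
    ∀ x ∈ fs s ES, rankOf x = rankDict.getD s 0 := by
  intro x hx
  simp [rankOf, sev_of_mem_fs s ES x hx]

theorem fs_append (s : String) (ES TS : List (List (String × String))) :
    fs s (ES ++ TS) = fs s ES ++ fs s TS := by
  simp [fs]

-- stable sort by rank = concatenation of the four per-severity filters, in rank order
theorem sorted_tagged (events : List (List (String × String))) :
    PySem.List.sorted (events.filter (fun e => rankDict.contains (sevOf e))) rankOf =
      fs "critical" events ++ fs "high" events ++ fs "medium" events ++ fs "low" events := by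
  rw [PySem.List.sorted_eq_foldl_insertBy]
  induction events using List.reverseRecOn with
  | nil => simp [fs]
  | append_singleton ES e ih =>
    rw [List.filter_append, List.foldl_append, ih]
    by_cases hB0 : sevOf e == "critical"
    · have hs : sevOf e = "critical" := eq_of_beq hB0
      have hc : rankDict.contains (sevOf e) = true := by rw [hs]; decide
      have hre : rankOf e = 0 := by rw [rankOf, hs]; decide
      have hys : ∀ y ∈ fs "critical" ES, (fun a b => decide (rankOf a < rankOf b)) e y = false := by
        intro y hy
        simp only [List.mem_append] at hy
        have hy0 := hy
        · simp [rank_fs _ _ y hy0, hre]; decide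
      have hzs : ∀ z ∈ fs "high" ES ++ fs "medium" ES ++ fs "low" ES, (fun a b => decide (rankOf a < rankOf b)) e z = true := by
        intro z hz
        simp only [List.mem_append] at hz
        rcases hz with (hz0 | hz1) | hz2
        · simp [rank_fs _ _ z hz0, hre]; decide
        · simp [rank_fs _ _ z hz1, hre]; decide
        · simp [rank_fs _ _ z hz2, hre]; decide
      have hfil : List.filter (fun e => rankDict.contains (sevOf e)) [e] = [e] := by
        simp [List.filter_cons, hc]
      have hsplit : (fs "critical" ES ++ fs "high" ES ++ fs "medium" ES ++ fs "low" ES : List (List (String × String))) = ((fs "critical" ES) ++ (fs "high" ES ++ fs "medium" ES ++ fs "low" ES)) := by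
        simp [List.append_assoc]
      rw [hfil, List.foldl_cons, List.foldl_nil, hsplit,
        insertBy_append _ _ _ _ hys, insertBy_front _ _ _ hzs]
      simp [fs_append, fs, List.filter_cons, hs, List.append_assoc]
    by_cases hB1 : sevOf e == "high"
    · have hs : sevOf e = "high" := eq_of_beq hB1
      have hc : rankDict.contains (sevOf e) = true := by rw [hs]; decide
      have hre : rankOf e = 1 := by rw [rankOf, hs]; decide
      have hys : ∀ y ∈ fs "critical" ES ++ fs "high" ES, (fun a b => decide (rankOf a < rankOf b)) e y = false := by
        intro y hy
        simp only [List.mem_append] at hy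
        rcases hy with hy0 | hy1
        · simp [rank_fs _ _ y hy0, hre]; decide
        · simp [rank_fs _ _ y hy1, hre]; decide
      have hzs : ∀ z ∈ fs "medium" ES ++ fs "low" ES, (fun a b => decide (rankOf a < rankOf b)) e z = true := by
        intro z hz
        simp only [List.mem_append] at hz
        rcases hz with hz0 | hz1
        · simp [rank_fs _ _ z hz0, hre]; decide
        · simp [rank_fs _ _ z hz1, hre]; decide
      have hfil : List.filter (fun e => rankDict.contains (sevOf e)) [e] = [e] := by
        simp [List.filter_cons, hc]
      have hsplit : (fs "critical" ES ++ fs "high" ES ++ fs "medium" ES ++ fs "low" ES : List (List (String × String))) = ((fs "critical" ES ++ fs "high" ES) ++ (fs "medium" ES ++ fs "low" ES)) := by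
        simp [List.append_assoc]
      rw [hfil, List.foldl_cons, List.foldl_nil, hsplit,
        insertBy_append _ _ _ _ hys, insertBy_front _ _ _ hzs]
      simp [fs_append, fs, List.filter_cons, hs, List.append_assoc]
    by_cases hB2 : sevOf e == "medium"
    · have hs : sevOf e = "medium" := eq_of_beq hB2
      have hc : rankDict.contains (sevOf e) = true := by rw [hs]; decide
      have hre : rankOf e = 2 := by rw [rankOf, hs]; decide
      have hys : ∀ y ∈ fs "critical" ES ++ fs "high" ES ++ fs "medium" ES, (fun a b => decide (rankOf a < rankOf b)) e y = false := by
        intro y hy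
        simp only [List.mem_append] at hy
        rcases hy with (hy0 | hy1) | hy2
        · simp [rank_fs _ _ y hy0, hre]; decide
        · simp [rank_fs _ _ y hy1, hre]; decide
        · simp [rank_fs _ _ y hy2, hre]; decide
      have hzs : ∀ z ∈ fs "low" ES, (fun a b => decide (rankOf a < rankOf b)) e z = true := by
        intro z hz
        simp only [List.mem_append] at hz
        have hz0 := hz
        · simp [rank_fs _ _ z hz0, hre]; decide
      have hfil : List.filter (fun e => rankDict.contains (sevOf e)) [e] = [e] := by
        simp [List.filter_cons, hc]
      have hsplit : (fs "critical" ES ++ fs "high" ES ++ fs "medium" ES ++ fs "low" ES : List (List (String × String))) = ((fs "critical" ES ++ fs "high" ES ++ fs "medium" ES) ++ (fs "low" ES)) := by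
        simp [List.append_assoc]
      rw [hfil, List.foldl_cons, List.foldl_nil, hsplit,
        insertBy_append _ _ _ _ hys, insertBy_front _ _ _ hzs]
      simp [fs_append, fs, List.filter_cons, hs, List.append_assoc]
    by_cases hB3 : sevOf e == "low"
    · have hs : sevOf e = "low" := eq_of_beq hB3
      have hc : rankDict.contains (sevOf e) = true := by rw [hs]; decide
      have hre : rankOf e = 3 := by rw [rankOf, hs]; decide
      have hys : ∀ y ∈ fs "critical" ES ++ fs "high" ES ++ fs "medium" ES ++ fs "low" ES, (fun a b => decide (rankOf a < rankOf b)) e y = false := by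
        intro y hy
        simp only [List.mem_append] at hy
        rcases hy with ((hy0 | hy1) | hy2) | hy3
        · simp [rank_fs _ _ y hy0, hre]; decide
        · simp [rank_fs _ _ y hy1, hre]; decide
        · simp [rank_fs _ _ y hy2, hre]; decide
        · simp [rank_fs _ _ y hy3, hre]; decide
      have hzs : ∀ z ∈ ([] : List (List (String × String))), (fun a b => decide (rankOf a < rankOf b)) e z = true := by
        intro z hz
        simp only [List.mem_append] at hz
        have hz0 := hz
        · simp at hz0
      have hfil : List.filter (fun e => rankDict.contains (sevOf e)) [e] = [e] := by
        simp [List.filter_cons, hc]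
      have hsplit : (fs "critical" ES ++ fs "high" ES ++ fs "medium" ES ++ fs "low" ES : List (List (String × String))) = ((fs "critical" ES ++ fs "high" ES ++ fs "medium" ES ++ fs "low" ES) ++ (([] : List (List (String × String))))) := by
        simp [List.append_assoc]
      rw [hfil, List.foldl_cons, List.foldl_nil, hsplit,
        insertBy_append _ _ _ _ hys, insertBy_front _ _ _ hzs]
      simp [fs_append, fs, List.filter_cons, hs, List.append_assoc]
    -- untagged: dropped by the filter, and none of the four groups changes
    have hc : rankDict.contains (sevOf e) = false := by
      rw [contains_rankDict]
      simp_all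
    have hfil : List.filter (fun e => rankDict.contains (sevOf e)) [e] = [] := by
      simp [List.filter_cons, hc]
    rw [hfil, List.foldl_nil]
    simp_all [fs_append, fs, List.filter_cons]


theorem takeWhile_run {α : Type} (p : α → Bool) (t rest : List α)
    (ht : ∀ e ∈ t, p e = true) (hr : ∀ e ∈ rest.head?, p e = false) :
    (t ++ rest).takeWhile p = t := by
  induction t with
  | nil =>
    cases rest with
    | nil => rfl
    | cons r rs => simp [List.takeWhile_cons, hr r (by simp)]
  | cons a t ih =>
    simp [List.takeWhile_cons, ht a (by simp), ih (fun e he => ht e (by simp [he]))]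

theorem dropWhile_run {α : Type} (p : α → Bool) (t rest : List α)
    (ht : ∀ e ∈ t, p e = true) (hr : ∀ e ∈ rest.head?, p e = false) :
    (t ++ rest).dropWhile p = rest := by
  induction t with
  | nil =>
    cases rest with
    | nil => rfl
    | cons r rs => simp [List.dropWhile_cons, hr r (by simp)]
  | cons a t ih =>
    simp [List.dropWhile_cons, ht a (by simp), ih (fun e he => ht e (by simp [he]))]

-- emitRuns splits off one whole run (possibly empty) at the front
theorem emitRuns_run (s : String) (g rest : List (List (String × String)))
    (hg : ∀ e ∈ g, sevOf e = s)
    (hrest : ∀ e ∈ rest.head?, sevOf e ≠ s) :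
    emitRuns (g ++ rest) = (if g.isEmpty then "" else secOf s g) ++ emitRuns rest := by
  cases g with
  | nil => simp
  | cons x t =>
    have hx : sevOf x = s := hg x (by simp)
    have htake := takeWhile_run (fun e => sevOf e == sevOf x) t rest
      (fun e he => by simp [hg e (by simp [he]), hx])
      (fun e he => by
        simp only [hx]
        simpa using hrest e he)
    have hdrop := dropWhile_run (fun e => sevOf e == sevOf x) t rest
      (fun e he => by simp [hg e (by simp [he]), hx])
      (fun e he => by
        simp only [hx]
        simpa using hrest e he)
    rw [hx] at htake hdrop
    rw [List.cons_append]
    simp only [emitRuns, secOf, hx, htake, hdrop, List.isEmpty_cons,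
      Bool.false_eq_true, if_false]

-- A's per-severity body, in terms of the filters
theorem sevBodyA_eq (events : List (List (String × String))) (analysis s : String) :
    sevBodyA (events.foldl sevStepA PySem.Dict.empty) analysis s =
      analysis ++ (if (fs s events).isEmpty then "" else secOf s (fs s events)) := by
  have hG := foldl_sevStepA_getD events PySem.Dict.empty s
  have hC := foldl_sevStepA_contains events PySem.Dict.empty s
  simp only [PySem.Dict.getD_empty, PySem.Dict.contains_empty, List.nil_append,
    Bool.false_or] at hG hC
  by_cases hne : events.any (fun e => sevOf e == s) = true
  · have hnil : fs s events ≠ [] := by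
      simp only [fs, ne_eq, List.filter_eq_nil_iff]
      intro h
      rcases List.any_eq_true.mp hne with ⟨e, he, hse⟩
      exact absurd hse (by simpa using h e he)
    simp only [sevBodyA, hG, hC, hne, if_pos]
    rw [if_neg (by simpa [List.isEmpty_iff] using hnil)]
    simp [secOf, String.append_assoc]
  · have hfil : fs s events = [] := by
      simp only [fs, List.filter_eq_nil_iff]
      intro e he hse
      exact hne (List.any_eq_true.mpr ⟨e, he, hse⟩)
    simp [sevBodyA, hC, hne, hfil]

-- ===== VERDICT (by name: the statement is the Claim_ definition above) =====
theorem analyze_by_severity_py_spec : Claim_equal_analyze_by_severity_py := by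
  intro events _
  unfold Spec_analyze_by_severity_py analyze_by_severity_py analyze_by_severity_py_alt
  dsimp only
  rw [sorted_tagged]
  rw [show fs "critical" events ++ fs "high" events ++ fs "medium" events ++ fs "low" events
      = fs "critical" events ++ (fs "high" events ++ (fs "medium" events ++ fs "low" events))
    from by simp [List.append_assoc]]
  rw [emitRuns_run "critical" _ _ (fun e he => sev_of_mem_fs _ _ e he)
    (fun e he => by
      have hm := List.mem_of_mem_head? he
      simp only [List.mem_append] at hm
      rcases hm with h | h | h <;> rw [sev_of_mem_fs _ _ e h] <;> decide)]
  rw [emitRuns_run "high" _ _ (fun e he => sev_of_mem_fs _ _ e he)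
    (fun e he => by
      have hm := List.mem_of_mem_head? he
      simp only [List.mem_append] at hm
      rcases hm with h | h <;> rw [sev_of_mem_fs _ _ e h] <;> decide)]
  rw [emitRuns_run "medium" _ _ (fun e he => sev_of_mem_fs _ _ e he)
    (fun e he => by
      have hm := List.mem_of_mem_head? he
      rw [sev_of_mem_fs _ _ e hm]
      decide)]
  rw [show fs "low" events = fs "low" events ++ [] from by simp]
  rw [emitRuns_run "low" _ _ (fun e he => sev_of_mem_fs _ _ e he)
    (fun e he => by simp at he)]
  simp only [List.foldl_cons, List.foldl_nil, sevBodyA_eq]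
  simp [emitRuns, String.append_assoc]
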